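-- pv_equiv track=rewrite | github.com/AmitMY/chimera | utils/aligner.py | comp_order
-- ===== SOURCE A (Python) =====
-- SENTENCE_BREAK = " _SENTENCE_BREAK_ "
--
-- def comp_order(ref, plan, skippable=set()):
--     # Some pruning
--     if len(plan) < len(ref):
--         return False
--
--     # New set reference
--     skippable = set(skippable)
--
--     for i in range(len(ref)):
--         if ref[i] != plan[i]:
--             if plan[i] in skippable:
--                 return comp_order(ref[i:], plan[i + 1:], skippable)
--             else:
--                 return False
--         if ref[i] != SENTENCE_BREAK:
--             skippable.add(ref[i])
--
--     return True
-- ===== SOURCE B (Python) =====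
-- SENTENCE_BREAK = " _SENTENCE_BREAK_ "
--
-- def comp_order(ref, plan, skippable=set()):
--     # Single pass over plan with a match pointer into ref and a skip budget
--     # (number of plan tokens that may still be dropped); no slicing, no recursion.
--     if len(plan) < len(ref):
--         return False
--     seen = set(skippable)
--     i = 0
--     budget = len(plan) - len(ref)
--     for tok in plan:
--         if i == len(ref):
--             return True
--         if tok == ref[i]:
--             if ref[i] != SENTENCE_BREAK:
--                 seen.add(ref[i])
--             i += 1
--         elif tok in seen and budget > 0:
--             budget -= 1
--         else:
--             return False
--     return i == len(ref)
-- ===== Notes on version B (the rewrite author's own statement) =====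
-- stated objective: alternative
-- what changed: Replaced the recursive restart-with-slices scan (which re-copies the skippable set and re-slices ref/plan on every skipped token) by a single iterative pass over plan with a match pointer into ref and a skip-budget counter that subsumes the per-call length pruning.
import Mathlib
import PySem

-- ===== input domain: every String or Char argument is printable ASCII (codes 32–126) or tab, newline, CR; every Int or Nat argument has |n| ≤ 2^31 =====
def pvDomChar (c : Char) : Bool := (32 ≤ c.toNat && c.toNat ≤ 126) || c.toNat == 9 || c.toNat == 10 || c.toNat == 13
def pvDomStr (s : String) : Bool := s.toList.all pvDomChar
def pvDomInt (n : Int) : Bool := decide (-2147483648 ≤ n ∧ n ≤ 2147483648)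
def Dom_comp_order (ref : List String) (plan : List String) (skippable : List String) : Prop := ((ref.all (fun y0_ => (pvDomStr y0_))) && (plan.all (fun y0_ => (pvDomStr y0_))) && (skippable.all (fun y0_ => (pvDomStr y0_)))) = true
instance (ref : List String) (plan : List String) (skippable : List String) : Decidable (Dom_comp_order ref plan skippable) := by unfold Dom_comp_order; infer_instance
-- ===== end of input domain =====

-- B replaces A's recursive restart-with-slices scan by one iterative pass over plan
-- with a match pointer into ref and a skip-budget counter (objective: alternative).

-- ===== PORT A =====
def pvSB : String := " _SENTENCE_BREAK_ "

mutual
-- comp_order's body once skippable is a set: the pruning check, then the for loop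
def coA (ref : List String) (plan : List String) (sk : PySem.Set String) : Bool :=
  if plan.length < ref.length then false
  else coALoop ref plan sk
termination_by (plan.length, 1)

-- 'for i in range(len(ref))' over ref[i]/plan[i], as recursion on the two suffixes;
-- on mismatch with a skippable plan token, the recursive call comp_order(ref[i:], plan[i+1:], skippable)
-- (its 'set(skippable)' re-copy is a value-level no-op on a set and is dropped)
def coALoop (ref : List String) (plan : List String) (sk : PySem.Set String) : Bool :=
  match ref, plan with
  | [], _ => true
  | r :: rs, p :: ps =>
    if r ≠ p then
      if PySem.Set.contains sk p then coA (r :: rs) ps sk else false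
    else coALoop rs ps (if r ≠ pvSB then PySem.Set.add sk r else sk)
  | _ :: _, [] => false  -- unreachable: plan.length ≥ ref.length was checked before the loop
termination_by (plan.length, 0)
end

def comp_order (ref : List String) (plan : List String) (skippable : List String) : Bool :=
  coA ref plan (PySem.Set.ofList skippable)

-- ===== PORT B =====
-- Source B's for loop over plan; the index i into ref is carried as the remaining suffix of ref
-- (refRem = ref[i:], so 'i == len(ref)' is refRem = [] and ref[i] is refRem's head)
def coBGo (refRem : List String) (plan : List String) (seen : PySem.Set String) (budget : Int) : Bool :=
  match refRem, plan with
  | refRem, [] => refRem.isEmpty          -- loop ended: return i == len(ref)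
  | [], _ :: _ => true                    -- i == len(ref) inside the loop
  | r :: rs, tok :: rest =>
    if tok = r then
      coBGo rs rest (if r ≠ pvSB then PySem.Set.add seen r else seen) budget
    else if PySem.Set.contains seen tok && decide (budget > 0) then
      coBGo (r :: rs) rest seen (budget - 1)
    else false

def comp_order_alt (ref : List String) (plan : List String) (skippable : List String) : Bool :=
  if plan.length < ref.length then false
  else coBGo ref plan (PySem.Set.ofList skippable) ((plan.length : Int) - (ref.length : Int))

-- ===== PRECONDITION & SPEC =====
def Spec_comp_order (ref : List String) (plan : List String) (skippable : List String) (out : Bool) : Prop := out = comp_order_alt ref plan skippable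
instance (ref : List String) (plan : List String) (skippable : List String) (out : Bool) : Decidable (Spec_comp_order ref plan skippable out) := by unfold Spec_comp_order; infer_instance

-- ===== CLAIM (what is proved, stated in full; the proofs are below) =====
def Claim_equal_comp_order : Prop := ∀ (ref : List String) (plan : List String) (skippable : List String), Dom_comp_order ref plan skippable → Spec_comp_order ref plan skippable (comp_order ref plan skippable)

-- ===== LEMMAS AND PROOFS =====

lemma coA_eq_coBGo : ∀ (plan ref : List String) (sk : PySem.Set String),
    coA ref plan sk =
      if plan.length < ref.length then false
      else coBGo ref plan sk ((plan.length : Int) - (ref.length : Int)) := by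
  intro plan
  induction plan with
  | nil =>
    intro ref sk
    cases ref with
    | nil => simp [coA, coALoop, coBGo]
    | cons r rs => simp [coA]
  | cons p ps ih =>
    intro ref sk
    cases ref with
    | nil => simp [coA, coALoop, coBGo]
    | cons r rs =>
      simp only [List.length_cons]
      by_cases hlen : ps.length < rs.length
      · rw [coA, if_pos (by simpa using hlen), if_pos (by omega)]
      · rw [coA, if_neg (by simpa using hlen), if_neg (by omega), coALoop, coBGo]
        by_cases hrp : p = r
        · subst hrp
          rw [if_neg (by simp), if_pos rfl]
          have h1 := ih rs (if p ≠ pvSB then PySem.Set.add sk p else sk)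
          rw [coA, if_neg hlen] at h1
          rw [h1, if_neg hlen]
          congr 1
          push_cast
          ring
        · rw [if_pos (show r ≠ p from fun h => hrp h.symm), if_neg hrp]
          by_cases hin : PySem.Set.contains sk p = true
          · have hmem : p ∈ sk := by simpa using hin
            rw [if_pos hin, ih (r :: rs) sk]
            simp only [List.length_cons]
            by_cases hb : ps.length < rs.length + 1
            · rw [if_pos hb, if_neg (by simp; intro _; omega)]
            · rw [if_neg hb, if_pos (by simp; exact ⟨hmem, by omega⟩)]
              congr 1
              push_cast
              ring
          · have hmem : p ∉ sk := by simpa using hin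
            rw [if_neg hin, if_neg (by simp; exact fun h => absurd h hmem)]

-- ===== VERDICT (by name: the statement is the Claim_ definition above) =====
theorem comp_order_spec : Claim_equal_comp_order := by
  intro ref plan skippable _
  show comp_order ref plan skippable = comp_order_alt ref plan skippable
  rw [comp_order, comp_order_alt, coA_eq_coBGo]
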